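-- pv_equiv track=rewrite | github.com/eu-digital-sovereignty/EUDiSoPr2026 | visualization/generate_tables.py | count_email
-- ===== SOURCE A (Python) =====
-- from collections import Counter
--
-- def count_email(entries):
--     counter = Counter()
--     country_for = {}
--     for e in entries:
--         name = e.get("email_provider")
--         if not name:
--             continue
--         counter[name] += 1
--         country_for.setdefault(name, e.get("email_provider_hq") or "—")
--     return counter, country_for
-- ===== SOURCE B (Python) =====
-- from collections import Counter
--
-- def count_email(entries):
--     # Build an index: provider name -> list of its entries (encounter order),
--     # then derive both results from the index in a second pass.
--     groups = {}
--     for e in entries: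
--         name = e.get("email_provider")
--         if not name:
--             continue
--         groups.setdefault(name, []).append(e)
--     counter = Counter({name: len(g) for name, g in groups.items()})
--     country_for = {name: (g[0].get("email_provider_hq") or "—") for name, g in groups.items()}
--     return counter, country_for
-- ===== Notes on version B (the rewrite author's own statement) =====
-- stated objective: alternative
-- what changed: Replaces the incremental Counter/setdefault loop by a build-index-then-post-process shape: one pass groups entries by provider name, then the counter and the HQ map are both derived from the grouping in a second pass.
import Mathlib
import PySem

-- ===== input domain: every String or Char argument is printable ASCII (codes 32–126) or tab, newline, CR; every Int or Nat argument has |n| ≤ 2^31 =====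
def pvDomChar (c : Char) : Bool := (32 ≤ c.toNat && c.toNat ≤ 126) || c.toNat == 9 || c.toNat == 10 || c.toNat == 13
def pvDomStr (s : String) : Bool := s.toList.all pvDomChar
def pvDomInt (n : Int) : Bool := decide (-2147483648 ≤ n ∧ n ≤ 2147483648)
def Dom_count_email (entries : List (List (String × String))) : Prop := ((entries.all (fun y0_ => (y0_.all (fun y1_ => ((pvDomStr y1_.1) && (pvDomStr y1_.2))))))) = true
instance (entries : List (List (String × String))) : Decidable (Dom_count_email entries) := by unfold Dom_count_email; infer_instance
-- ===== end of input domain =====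

-- B restructures A's single incremental Counter/setdefault loop into build-an-index
-- (name -> its entries) then post-process; same cost, different decomposition.

-- shared helper: `e.get("email_provider_hq") or "—"`
def pvHq (e : List (String × String)) : String :=
  match (PySem.Dict.mk e).get? "email_provider_hq" with
  | none => "—"
  | some hq => if hq = "" then "—" else hq

-- ===== PORT A =====
def count_email (entries : List (List (String × String))) : (List (String × Int)) × (List (String × String)) :=
  let st := entries.foldl
    (fun (st : PySem.Dict String Int × PySem.Dict String String) e =>
      match (PySem.Dict.mk e).get? "email_provider" with
      | none => st                          -- `if not name: continue` (missing key)
      | some name =>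
        if name = "" then st                -- `if not name: continue` (empty string)
        else (st.1.modify name 0 (· + 1), st.2.setdefault name (pvHq e)))
    (PySem.Dict.empty, PySem.Dict.empty)
  (st.1.items, st.2.items)

-- ===== PORT B =====
def count_email_alt (entries : List (List (String × String))) : (List (String × Int)) × (List (String × String)) :=
  let groups : PySem.Dict String (List (List (String × String))) := entries.foldl
    (fun g e =>
      match (PySem.Dict.mk e).get? "email_provider" with
      | none => g
      | some name =>
        if name = "" then g
        else g.modify name [] (· ++ [e]))
    PySem.Dict.empty
  (groups.items.map (fun p => (p.1, (p.2.length : Int))),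
   groups.items.map (fun p => (p.1, match p.2 with | [] => "—" | e0 :: _ => pvHq e0)))

-- ===== PRECONDITION & SPEC =====
def Spec_count_email (entries : List (List (String × String))) (out : (List (String × Int)) × (List (String × String))) : Prop := out = count_email_alt entries
instance (entries : List (List (String × String))) (out : (List (String × Int)) × (List (String × String))) : Decidable (Spec_count_email entries out) := by unfold Spec_count_email; infer_instance

-- ===== CLAIM (what is proved, stated in full; the proofs are below) =====
def Claim_equal_count_email : Prop := ∀ (entries : List (List (String × String))), Dom_count_email entries → Spec_count_email entries (count_email entries)

-- ===== LEMMAS AND PROOFS =====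

-- post-processing B's grouping dict into A's two dicts
def cOf (g : PySem.Dict String (List (List (String × String)))) : PySem.Dict String Int :=
  ⟨g.items.map (fun p => (p.1, (p.2.length : Int)))⟩
def dOf (g : PySem.Dict String (List (List (String × String)))) : PySem.Dict String String :=
  ⟨g.items.map (fun p => (p.1, match p.2 with | [] => "—" | e0 :: _ => pvHq e0))⟩

lemma get?_cOf (g : PySem.Dict String (List (List (String × String)))) (n : String) :
    (cOf g).get? n = (g.get? n).map (fun w => (w.length : Int)) := by
  simp only [cOf, PySem.Dict.get?, List.find?_map, Function.comp_def]
  cases List.find? (fun p => p.1 == n) g.items <;> rfl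

lemma get?_dOf (g : PySem.Dict String (List (List (String × String)))) (n : String) :
    (dOf g).get? n = (g.get? n).map (fun w => match w with | [] => "—" | e0 :: _ => pvHq e0) := by
  simp only [dOf, PySem.Dict.get?, List.find?_map, Function.comp_def]
  cases List.find? (fun p => p.1 == n) g.items <;> rfl

lemma contains_cOf (g : PySem.Dict String (List (List (String × String)))) (n : String) :
    (cOf g).contains n = g.contains n := by
  rw [PySem.Dict.contains_eq_isSome_get?, PySem.Dict.contains_eq_isSome_get?, get?_cOf]
  cases g.get? n <;> rfl

lemma contains_dOf (g : PySem.Dict String (List (List (String × String)))) (n : String) :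
    (dOf g).contains n = g.contains n := by
  rw [PySem.Dict.contains_eq_isSome_get?, PySem.Dict.contains_eq_isSome_get?, get?_dOf]
  cases g.get? n <;> rfl

lemma step_c (g : PySem.Dict String (List (List (String × String)))) (n : String)
    (e : List (String × String)) :
    cOf (g.modify n [] (· ++ [e])) = (cOf g).modify n 0 (· + 1) := by
  by_cases hc : g.contains n = true
  · have hc' : (cOf g).contains n = true := by rw [contains_cOf]; exact hc
    obtain ⟨w, hw⟩ : ∃ w, g.get? n = some w := by
      have := PySem.Dict.contains_eq_isSome_get? g n
      rw [hc] at this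
      cases hg : g.get? n
      · rw [hg] at this; simp at this
      · exact ⟨_, rfl⟩
    have hgd : g.getD n [] = w := by rw [PySem.Dict.getD_eq_get?_getD, hw]; rfl
    have hgd2 : (cOf g).getD n 0 = (w.length : Int) := by
      rw [PySem.Dict.getD_eq_get?_getD, get?_cOf, hw]; rfl
    simp only [PySem.Dict.modify, hgd, hgd2, PySem.Dict.insert, hc, hc', if_pos]
    apply PySem.Dict.ext
    simp only [cOf, List.map_map]
    apply List.map_congr_left
    intro p _
    by_cases hp : p.1 = n
    · simp [hp, List.length_append]
    · simp [hp]
  · have hcf : g.contains n = false := by simpa using hc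
    have hcf' : (cOf g).contains n = false := by rw [contains_cOf]; exact hcf
    have hgd : g.getD n [] = [] := PySem.Dict.getD_of_not_contains g _ hcf
    have hgd2 : (cOf g).getD n 0 = 0 := PySem.Dict.getD_of_not_contains _ _ hcf'
    simp only [PySem.Dict.modify, hgd, hgd2, PySem.Dict.insert, hcf, hcf']
    apply PySem.Dict.ext
    simp [cOf]

lemma step_d (g : PySem.Dict String (List (List (String × String)))) (n : String)
    (e : List (String × String)) (hnd : g.keys.Nodup)
    (hne : ∀ p ∈ g.items, p.2 ≠ []) :
    dOf (g.modify n [] (· ++ [e])) = (dOf g).setdefault n (pvHq e) := by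
  by_cases hc : g.contains n = true
  · have hc' : (dOf g).contains n = true := by rw [contains_dOf]; exact hc
    rw [PySem.Dict.setdefault_of_contains _ _ hc']
    obtain ⟨w, hw⟩ : ∃ w, g.get? n = some w := by
      have := PySem.Dict.contains_eq_isSome_get? g n
      rw [hc] at this
      cases hg : g.get? n
      · rw [hg] at this; simp at this
      · exact ⟨_, rfl⟩
    have hgd : g.getD n [] = w := by rw [PySem.Dict.getD_eq_get?_getD, hw]; rfl
    simp only [PySem.Dict.modify, hgd, PySem.Dict.insert, hc, if_pos]
    apply PySem.Dict.ext
    simp only [dOf, List.map_map]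
    apply List.map_congr_left
    intro p hp
    by_cases hpn : p.1 = n
    · have hw2 : g.get? n = some p.2 := by
        rw [← hpn]
        exact PySem.Dict.get?_of_mem_items g (by simpa using hp) hnd
      have hwp : w = p.2 := by rw [hw] at hw2; exact Option.some.inj hw2
      rcases h2 : p.2 with _ | ⟨e0, t⟩
      · exact absurd h2 (hne p hp)
      · simp [hpn, hwp, h2]
    · simp [hpn]
  · have hcf : g.contains n = false := by simpa using hc
    have hcf' : (dOf g).contains n = false := by rw [contains_dOf]; exact hcf
    rw [PySem.Dict.setdefault_of_not_contains _ _ hcf']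
    have hgd : g.getD n [] = [] := PySem.Dict.getD_of_not_contains g _ hcf
    simp only [PySem.Dict.modify, hgd, PySem.Dict.insert, hcf, hcf']
    apply PySem.Dict.ext
    simp [dOf]

lemma step_nodup (g : PySem.Dict String (List (List (String × String)))) (n : String)
    (e : List (String × String)) (hnd : g.keys.Nodup) :
    (g.modify n [] (· ++ [e])).keys.Nodup := by
  simpa [PySem.Dict.modify] using PySem.Dict.nodup_keys_insert g n (g.getD n [] ++ [e]) hnd

lemma step_nonempty (g : PySem.Dict String (List (List (String × String)))) (n : String)
    (e : List (String × String)) (hne : ∀ p ∈ g.items, p.2 ≠ []) :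
    ∀ p ∈ (g.modify n [] (· ++ [e])).items, p.2 ≠ [] := by
  intro p hp
  simp only [PySem.Dict.modify, PySem.Dict.insert] at hp
  by_cases hc : g.contains n = true
  · rw [if_pos hc] at hp
    simp only [List.mem_map] at hp
    obtain ⟨q, hq, hpq⟩ := hp
    by_cases hqn : (q.1 == n) = true
    · rw [if_pos hqn] at hpq; subst hpq; simp
    · rw [if_neg hqn] at hpq; subst hpq; exact hne q hq
  · rw [if_neg hc] at hp
    rcases List.mem_append.mp hp with hp | hp
    · exact hne p hp
    · rw [List.mem_singleton.mp hp]; simp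

lemma loop_eq (entries : List (List (String × String)))
    (g : PySem.Dict String (List (List (String × String))))
    (hnd : g.keys.Nodup) (hne : ∀ p ∈ g.items, p.2 ≠ []) :
    entries.foldl
      (fun (st : PySem.Dict String Int × PySem.Dict String String) e =>
        match (PySem.Dict.mk e).get? "email_provider" with
        | none => st
        | some name =>
          if name = "" then st
          else (st.1.modify name 0 (· + 1), st.2.setdefault name (pvHq e)))
      (cOf g, dOf g)
    = (cOf (entries.foldl
        (fun g e =>
          match (PySem.Dict.mk e).get? "email_provider" with
          | none => g
          | some name =>
            if name = "" then g
            else g.modify name [] (· ++ [e]))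
        g),
       dOf (entries.foldl
        (fun g e =>
          match (PySem.Dict.mk e).get? "email_provider" with
          | none => g
          | some name =>
            if name = "" then g
            else g.modify name [] (· ++ [e]))
        g)) := by
  induction entries generalizing g with
  | nil => rfl
  | cons e rest ih =>
    simp only [List.foldl_cons]
    rcases hn : (PySem.Dict.mk e).get? "email_provider" with _ | name
    · exact ih g hnd hne
    · by_cases hname : name = ""
      · simp only [if_pos hname]
        exact ih g hnd hne
      · simp only [if_neg hname]
        rw [← step_c g name e, ← step_d g name e hnd hne]
        exact ih _ (step_nodup g name e hnd) (step_nonempty g name e hne)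

-- ===== VERDICT (by name: the statement is the Claim_ definition above) =====
theorem count_email_spec : Claim_equal_count_email := by
  intro entries _
  unfold Spec_count_email count_email count_email_alt
  have h := loop_eq entries PySem.Dict.empty (by simp [PySem.Dict.empty, PySem.Dict.keys])
    (by intro p hp; simp [PySem.Dict.empty] at hp)
  have hce : cOf PySem.Dict.empty = PySem.Dict.empty := rfl
  have hde : dOf PySem.Dict.empty = PySem.Dict.empty := rfl
  rw [hce, hde] at h
  simp only [h]
  rfl
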